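-- pv_equiv track=rewrite | github.com/shinsoo0203/programming | gravity101/7-30 더 맵게.py | solution
-- ===== SOURCE A (Python) =====
-- import heapq
--
-- def solution(scoville, K):
--     answer = 0
--
--     if K == 0:
--         return 0
--
--     heapq.heapify(scoville)
--
--     while len(scoville) >= 2 and scoville[0] < K:
--         a = heapq.heappop(scoville)
--         b = heapq.heappop(scoville)
--         heapq.heappush(scoville, a + (b * 2))
--         answer += 1
--
--     if scoville[0] < K:
--         return -1
--     return answer
-- ===== SOURCE B (Python) =====
-- def solution(scoville, K):
--     if K == 0:
--         return 0
--     s = sorted(scoville)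
--     answer = 0
--     while True:
--         if s[0] >= K:
--             return answer
--         if len(s) < 2:
--             return -1
--         x = s[0] + 2 * s[1]
--         rest = s[2:]
--         i = 0
--         while i < len(rest) and rest[i] < x:
--             i += 1
--         rest.insert(i, x)
--         s = rest
--         answer += 1
-- ===== Notes on version B (the rewrite author's own statement) =====
-- stated objective: alternative
-- what changed: Replaces the binary heap with a fully sorted list maintained by linear ordered insertion: the two smallest are the first two elements and each new mixture is inserted at its sorted position, so no heap sift operations remain; equivalence is about the return value (A heapifies the caller's list in place, B does not mutate it).
import Mathlib
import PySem

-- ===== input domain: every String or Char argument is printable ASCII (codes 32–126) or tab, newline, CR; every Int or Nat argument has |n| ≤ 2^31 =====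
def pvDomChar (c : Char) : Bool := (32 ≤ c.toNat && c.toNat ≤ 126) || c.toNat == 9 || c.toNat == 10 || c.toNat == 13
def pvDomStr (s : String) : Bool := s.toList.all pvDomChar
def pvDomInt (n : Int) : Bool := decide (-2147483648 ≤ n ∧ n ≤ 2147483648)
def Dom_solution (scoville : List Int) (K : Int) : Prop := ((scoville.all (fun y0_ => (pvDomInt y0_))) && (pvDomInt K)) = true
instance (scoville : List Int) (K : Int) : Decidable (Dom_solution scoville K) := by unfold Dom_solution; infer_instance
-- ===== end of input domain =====

-- B replaces A's binary heap with a fully sorted list maintained by ordered insertion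
-- (alternative data structure; return values proved equal). Side effects differ: A
-- heapifies the caller's list in place, B leaves it unmutated; the equivalence claimed
-- here is about the RETURN value only.

-- ===== PORT A =====
-- heapq is ported by its contract: the heap is the list of its elements, heap[0] is the
-- minimum, heappop removes and returns the minimum, heappush appends the element, and
-- heapify is a permutation. This is exact for `solution`, whose result depends only on
-- the popped minima and on heap[0] (Int elements: equal elements are indistinguishable).
-- (cited by the port's decreasing_by:) the minimum of a nonempty list is a member
lemma minD_mem (l : List Int) (h : l ≠ []) : (PySem.List.min? l (fun x => x)).getD 0 ∈ l := by
  cases hm : PySem.List.min? l (fun x => x) with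
  | none => exact absurd ((PySem.List.min?_eq_none_iff l _).mp hm) h
  | some m => simpa using PySem.List.min?_mem hm

def solutionLoop (heap : List Int) (K : Int) (answer : Int) : Int :=
  if hc : 2 ≤ heap.length ∧ (PySem.List.min? heap (fun x => x)).getD 0 < K then
    let a := (PySem.List.min? heap (fun x => x)).getD 0   -- a = heappop(scoville)
    let h1 := heap.erase a
    let b := (PySem.List.min? h1 (fun x => x)).getD 0     -- b = heappop(scoville)
    solutionLoop (h1.erase b ++ [a + b * 2]) K (answer + 1)  -- heappush(scoville, a + b*2)
  else
    match heap with
    | [] => 0  -- scoville[0] on the empty list raises IndexError; excluded by Pre_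
    | _ :: _ =>
      if (PySem.List.min? heap (fun x => x)).getD 0 < K then -1 else answer
termination_by heap.length
decreasing_by
  have hne : heap ≠ [] := by intro h; subst h; simp at hc
  have ha : (PySem.List.min? heap (fun x => x)).getD 0 ∈ heap := minD_mem heap hne
  have h1len : (heap.erase ((PySem.List.min? heap (fun x => x)).getD 0)).length
      = heap.length - 1 := List.length_erase_of_mem ha
  have hne1 : heap.erase ((PySem.List.min? heap (fun x => x)).getD 0) ≠ [] := by
    intro h; rw [h] at h1len; simp at h1len; omega
  have hb := minD_mem _ hne1
  have h2len := List.length_erase_of_mem hb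
  simp only [List.length_append, List.length_cons, List.length_nil]
  omega

def solution (scoville : List Int) (K : Int) : Int :=
  if K == 0 then 0
  else solutionLoop scoville K 0

-- ===== PORT B =====
-- the inner scan `i = 0; while i < len(rest) and rest[i] < x: i += 1`
-- (the index stays in range, so List.getD is exact for rest[i])
def insPos (rest : List Int) (x : Int) (i : Nat) : Nat :=
  if h : i < rest.length ∧ rest.getD i 0 < x then insPos rest x (i + 1) else i
termination_by rest.length - i

def solutionAltLoop (s : List Int) (K : Int) (answer : Int) : Int :=
  match s with
  | [] => 0  -- s[0] on the empty list raises IndexError; excluded by Pre_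
  | a :: t =>
    if K ≤ a then answer
    else if (a :: t).length < 2 then -1  -- len(s) < 2
    else
      let x := a + 2 * t.getD 0 0      -- x = s[0] + 2 * s[1]
      let rest := t.drop 1             -- rest = s[2:]
      let i := insPos rest x 0
      solutionAltLoop (PySem.List.insert rest (i : Int) x) K (answer + 1)  -- rest.insert(i, x)
termination_by s.length
decreasing_by
  rename_i hlt
  simp only [List.length_cons, not_lt] at hlt
  simp only [PySem.List.length_insert, List.length_drop, List.length_cons]
  omega

def solution_alt (scoville : List Int) (K : Int) : Int :=
  if K == 0 then 0
  else solutionAltLoop (PySem.List.sorted scoville (fun x => x) false) K 0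

-- ===== PRECONDITION & SPEC =====
-- Pre_ excludes only ([], K ≠ 0), on which both A and B raise IndexError (scoville[0]/s[0]).
def Pre_solution (scoville : List Int) (K : Int) : Prop := K = 0 ∨ scoville ≠ []
instance (scoville : List Int) (K : Int) : Decidable (Pre_solution scoville K) := by
  unfold Pre_solution; infer_instance
def pvWitness_solution : List Int × Int := ([1, 2, 3, 9, 10, 12], 7)

def Spec_solution (scoville : List Int) (K : Int) (out : Int) : Prop := out = solution_alt scoville K
instance (scoville : List Int) (K : Int) (out : Int) : Decidable (Spec_solution scoville K out) := by
  unfold Spec_solution; infer_instance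

-- ===== CLAIM (what is proved, stated in full; the proofs are below) =====
def Claim_equal_solution : Prop := ∀ (scoville : List Int) (K : Int), Dom_solution scoville K → Pre_solution scoville K → Spec_solution scoville K (solution scoville K)

-- ===== LEMMAS AND PROOFS =====

-- unfolding equations for the two loops
lemma solLoop_nil (K ans : Int) : solutionLoop [] K ans = 0 := by
  rw [solutionLoop, dif_neg (by simp)]

lemma solLoop_stop (h0 : Int) (t0 : List Int) (K ans : Int)
    (hc : ¬ (2 ≤ (h0 :: t0).length ∧ (PySem.List.min? (h0 :: t0) (fun x => x)).getD 0 < K)) :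
    solutionLoop (h0 :: t0) K ans
      = if (PySem.List.min? (h0 :: t0) (fun x => x)).getD 0 < K then -1 else ans := by
  rw [solutionLoop, dif_neg hc]

lemma altLoop_nil (K ans : Int) : solutionAltLoop [] K ans = 0 := by
  rw [solutionAltLoop.eq_def]

lemma altLoop_cons (a : Int) (t : List Int) (K ans : Int) :
    solutionAltLoop (a :: t) K ans
      = (if K ≤ a then ans
         else if (a :: t).length < 2 then -1
         else solutionAltLoop
           (PySem.List.insert (t.drop 1)
             ((insPos (t.drop 1) (a + 2 * t.getD 0 0) 0 : Nat) : Int)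
             (a + 2 * t.getD 0 0)) K (ans + 1)) := by
  rw [solutionAltLoop.eq_def]

-- On a list that is a permutation of a sorted list m :: t, the Python minimum is m.
lemma min?_perm_sorted {heap : List Int} {m : Int} {t : List Int}
    (hp : heap.Perm (m :: t)) (hs : (m :: t).Pairwise (· ≤ ·)) :
    PySem.List.min? heap (fun x => x) = some m := by
  cases hmin : PySem.List.min? heap (fun x => x) with
  | none =>
      rw [PySem.List.min?_eq_none_iff] at hmin
      subst hmin
      exact absurd hp.symm (by simp)
  | some m' =>
      have hm' : m' ∈ heap := PySem.List.min?_mem hmin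
      have hmem : m' ∈ m :: t := hp.mem_iff.mp hm'
      have hle : m' ≤ m :=
        PySem.List.min?_isMin hmin m (hp.mem_iff.mpr (by simp))
      have hge : m ≤ m' := by
        rcases List.mem_cons.mp hmem with h | h
        · omega
        · exact (List.pairwise_cons.mp hs).1 m' h
      rw [le_antisymm hle hge]

-- shifting the scan start past the head of the list
lemma insPos_cons_succ (r : Int) (rs : List Int) (x : Int) :
    ∀ i, insPos (r :: rs) x (i + 1) = insPos rs x i + 1 := by
  intro i
  induction hn : rs.length - i using Nat.strong_induction_on generalizing i with
  | _ n ih =>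
    conv_lhs => rw [insPos]
    conv_rhs => rw [insPos]
    by_cases hcond : i < rs.length ∧ rs.getD i 0 < x
    · have hc2 : i + 1 < (r :: rs).length ∧ (r :: rs).getD (i + 1) 0 < x := by
        simpa using hcond
      rw [dif_pos hc2, dif_pos hcond]
      exact ih (rs.length - (i + 1)) (by omega) (i + 1) rfl
    · have hc2 : ¬ (i + 1 < (r :: rs).length ∧ (r :: rs).getD (i + 1) 0 < x) := by
        simpa using hcond
      rw [dif_neg hc2, dif_neg hcond]

lemma insPos_le_length (rest : List Int) (x : Int) : insPos rest x 0 ≤ rest.length := by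
  induction rest with
  | nil => rw [insPos]; simp
  | cons r rs ih =>
      rw [insPos]
      by_cases h : r < x
      · have hc : 0 < (r :: rs).length ∧ (r :: rs).getD 0 0 < x := by simpa using h
        rw [dif_pos hc, show (0 + 1 : Nat) = 0 + 1 from rfl, insPos_cons_succ]
        simpa using ih
      · have hc : ¬ (0 < (r :: rs).length ∧ (r :: rs).getD 0 0 < x) := by simpa using h
        rw [dif_neg hc]; simp

-- the scan-then-insert of B is exactly ordered insertion
lemma insert_insPos_eq_orderedInsert (rest : List Int) (x : Int) :
    PySem.List.insert rest ((insPos rest x 0 : Nat) : Int) x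
      = List.orderedInsert (· ≤ ·) x rest := by
  induction rest with
  | nil =>
      rw [insPos]
      simp [PySem.List.insert_zero, List.orderedInsert]
  | cons r rs ih =>
      rw [insPos]
      by_cases h : r < x
      · have hc : 0 < (r :: rs).length ∧ (r :: rs).getD 0 0 < x := by simpa using h
        rw [dif_pos hc, show (0 + 1 : Nat) = 0 + 1 from rfl, insPos_cons_succ]
        have hle : insPos rs x 0 ≤ rs.length := insPos_le_length rs x
        rw [PySem.List.insert_natCast _ _ _ (by simp; omega)]
        rw [List.take_succ_cons, List.drop_succ_cons]
        rw [PySem.List.insert_natCast _ _ _ hle] at ih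
        have hxr : ¬ x ≤ r := not_le.mpr h
        simp only [List.orderedInsert, if_neg hxr, List.cons_append, ih]
      · have hc : ¬ (0 < (r :: rs).length ∧ (r :: rs).getD 0 0 < x) := by simpa using h
        rw [dif_neg hc]
        have hxr : x ≤ r := not_lt.mp h
        simp [PySem.List.insert_zero, List.orderedInsert, hxr]

-- main loop equivalence: A's heap and B's sorted list hold the same multiset
lemma loop_eq (n : Nat) :
    ∀ (heap s : List Int) (K ans : Int), heap.length = n →
      heap.Perm s → s.Pairwise (· ≤ ·) →
      solutionLoop heap K ans = solutionAltLoop s K ans := by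
  induction n using Nat.strong_induction_on with
  | _ n ih =>
    intro heap s K ans hlen hp hs
    cases s with
    | nil =>
        rw [List.perm_nil.mp hp, solLoop_nil, altLoop_nil]
    | cons m t =>
      have hmin : PySem.List.min? heap (fun x => x) = some m := min?_perm_sorted hp hs
      have hlen2 : heap.length = t.length + 1 := by rw [hp.length_eq]; simp
      by_cases hK : m < K
      · cases t with
        | nil =>
            have hh : heap = [m] := List.perm_singleton.mp hp
            subst hh
            rw [solLoop_stop m [] K ans (by simp), altLoop_cons]
            simp [hmin, hK, not_le.mpr hK]
        | cons b t2 =>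
            have hc : 2 ≤ heap.length ∧ (PySem.List.min? heap (fun x => x)).getD 0 < K := by
              refine ⟨?_, by rw [hmin]; simpa using hK⟩
              have h := hlen2; simp only [List.length_cons] at h; omega
            have hse : (m :: b :: t2).erase m = b :: t2 := by
              simp [List.erase_cons_head]
            have hp1 : (heap.erase m).Perm (b :: t2) := by
              have := hp.erase m; rwa [hse] at this
            have hs1 : (b :: t2).Pairwise (· ≤ ·) := (List.pairwise_cons.mp hs).2
            have hmin1 : PySem.List.min? (heap.erase m) (fun x => x) = some b :=
              min?_perm_sorted hp1 hs1
            have hp2 : ((heap.erase m).erase b).Perm t2 := by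
              have := hp1.erase b
              rwa [List.erase_cons_head] at this
            have hx : m + b * 2 = m + 2 * b := by ring
            have hperm : ((heap.erase m).erase b ++ [m + 2 * b]).Perm
                (List.orderedInsert (· ≤ ·) (m + 2 * b) t2) := by
              refine (hp2.append_right _).trans ?_
              exact (List.perm_append_singleton _ _).trans
                (List.perm_orderedInsert _ _ _).symm
            have hsorted : (List.orderedInsert (· ≤ ·) (m + 2 * b) t2).Pairwise (· ≤ ·) :=
              List.Pairwise.orderedInsert _ _ (List.pairwise_cons.mp hs1).2
            have ha : m ∈ heap := hp.mem_iff.mpr (by simp)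
            have hb : b ∈ heap.erase m := hp1.mem_iff.mpr (by simp)
            have hlen3 : ((heap.erase m).erase b ++ [m + 2 * b]).length = heap.length - 1 := by
              simp only [List.length_append, List.length_cons, List.length_nil,
                List.length_erase_of_mem hb, List.length_erase_of_mem ha]
              omega
            rw [solutionLoop, dif_pos hc]
            simp only [hmin, hmin1, Option.getD_some]
            rw [altLoop_cons]
            rw [if_neg (not_le.mpr hK), if_neg (by simp)]
            simp only [List.getD_cons_zero, List.drop_succ_cons, List.drop_zero]
            rw [insert_insPos_eq_orderedInsert, hx]
            exact ih (heap.length - 1) (by omega) _ _ K (ans + 1) hlen3 hperm hsorted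
      · -- m ≥ K: both loops stop and return the answer
        have hne : heap ≠ [] := by
          intro h; subst h; have := hp.length_eq; simp at this
        obtain ⟨h0, t0, rfl⟩ : ∃ h0 t0, heap = h0 :: t0 := by
          cases heap with
          | nil => exact absurd rfl hne
          | cons h0 t0 => exact ⟨h0, t0, rfl⟩
        rw [solLoop_stop h0 t0 K ans (by simp [hmin, hK]), altLoop_cons]
        simp [hmin, hK, not_lt.mp hK]

-- ===== VERDICT (by name: the statement is the Claim_ definition above) =====
theorem solution_spec : Claim_equal_solution := by
  intro scoville K _ hpre
  unfold Spec_solution solution solution_alt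
  by_cases hK : K == 0
  · simp [hK]
  · simp only [hK, Bool.false_eq_true, if_false]
    exact loop_eq scoville.length scoville
      (PySem.List.sorted scoville (fun x => x) false) K 0 rfl
      (PySem.List.sorted_perm scoville (fun x => x) false).symm
      (PySem.List.sorted_pairwise scoville (fun x => x))
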